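-- pv_equiv track=rewrite | github.com/SS4G/Algorithm_exercise | exercise/leetcode/python_src/by2017_Sep/Leet646.py | findLastLittle
-- ===== SOURCE A (Python) =====
-- def findLastLittle(arr, val):
--     if val < arr[0]:
--         return -1
--     li = 0
--     hi = len(arr) - 1
--     while li <= hi:
--         mid = (li + hi) >> 1
--         if arr[mid] < val:
--             li = mid + 1
--         elif arr[mid] > val:
--             hi = mid - 1
--         else:
--             return mid - 1
--     return hi
-- ===== SOURCE B (Python) =====
-- def findLastLittle(arr, val):
--     if val < arr[0]:
--         return -1
--     def go(sub, off):
--         # invariant: sub is arr[off : off + len(sub)]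
--         if not sub:
--             return off - 1
--         m = (len(sub) - 1) >> 1
--         x = sub[m]
--         if x < val:
--             return go(sub[m + 1:], off + m + 1)
--         elif x > val:
--             return go(sub[:m], off)
--         else:
--             return off + m - 1
--     return go(arr, 0)
-- ===== Notes on version B (the rewrite author's own statement) =====
-- stated objective: alternative
-- what changed: Replaces the index-pair while-loop with a recursive helper over list slices carrying an offset: the base case and each step shrink the list itself (sub[m+1:], sub[:m]) instead of moving li/hi indices over the full array.
-- outside the precondition, e.g. on findLastLittle([], 0): A raises IndexError, B raises IndexError
import Mathlib
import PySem

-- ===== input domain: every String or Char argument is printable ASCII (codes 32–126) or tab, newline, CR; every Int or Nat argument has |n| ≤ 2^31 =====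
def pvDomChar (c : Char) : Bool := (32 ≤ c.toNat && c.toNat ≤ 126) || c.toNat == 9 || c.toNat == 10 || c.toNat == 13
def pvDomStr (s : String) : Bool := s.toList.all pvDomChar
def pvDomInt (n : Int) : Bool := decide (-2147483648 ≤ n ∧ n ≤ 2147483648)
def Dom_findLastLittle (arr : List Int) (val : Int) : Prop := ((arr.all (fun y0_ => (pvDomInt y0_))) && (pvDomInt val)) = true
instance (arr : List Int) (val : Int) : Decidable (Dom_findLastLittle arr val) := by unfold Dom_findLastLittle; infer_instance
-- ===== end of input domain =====

-- B re-implements A's while-loop binary search as a recursive helper over list slices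
-- with an explicit offset (objective: alternative decomposition, same probe sequence).

-- ===== PORT A =====
-- the while-loop of A, as structural recursion on the index pair (li, hi)
def findLastLoopA (arr : List Int) (val li hi : Int) : Int :=
  if h : li ≤ hi then
    let mid := PySem.Int.floordiv (li + hi) 2
    match PySem.List.pyGet? arr mid with
    | some x =>
      if x < val then findLastLoopA arr val (mid + 1) hi
      else if x > val then findLastLoopA arr val li (mid - 1)
      else mid - 1
    | none => 0  -- IndexError; unreachable from the entry call, where 0 ≤ li ≤ mid ≤ hi < arr.length
  else hi
termination_by (hi - li + 1).toNat
decreasing_by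
  · have hb := PySem.Int.floordiv_two_mid_bounds h; omega
  · have hb := PySem.Int.floordiv_two_mid_bounds h; omega

def findLastLittle (arr : List Int) (val : Int) : Int :=
  match PySem.List.pyGet? arr 0 with
  | none => 0  -- IndexError on arr = []; excluded by Pre_
  | some a0 => if val < a0 then -1 else findLastLoopA arr val 0 ((arr.length : Int) - 1)

-- ===== PORT B =====
-- Source B's helper go(sub, off): recursion on the slice itself
def findLastGoB (val : Int) (sub : List Int) (off : Int) : Int :=
  if h : sub = [] then off - 1
  else
    let m := PySem.Int.floordiv ((sub.length : Int) - 1) 2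
    match PySem.List.pyGet? sub m with
    | some x =>
      if x < val then findLastGoB val (PySem.List.slice sub (some (m + 1)) none) (off + m + 1)
      else if x > val then findLastGoB val (PySem.List.slice sub none (some m)) off
      else off + m - 1
    | none => 0  -- IndexError; unreachable: 0 ≤ m < sub.length since sub ≠ []
termination_by sub.length
decreasing_by
  · have hlp := List.length_pos_iff.mpr h
    have hb := PySem.Int.floordiv_two_mid_bounds
      (show (0:Int) ≤ (sub.length : Int) - 1 by omega)
    simp only [zero_add] at hb
    rw [PySem.List.slice_from sub (by omega)]
    simp only [List.length_drop]
    omega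
  · have hlp := List.length_pos_iff.mpr h
    have hb := PySem.Int.floordiv_two_mid_bounds
      (show (0:Int) ≤ (sub.length : Int) - 1 by omega)
    simp only [zero_add] at hb
    rw [PySem.List.slice_to sub (by omega)]
    simp only [List.length_take]
    omega

def findLastLittle_alt (arr : List Int) (val : Int) : Int :=
  match PySem.List.pyGet? arr 0 with
  | none => 0  -- IndexError on arr = []; excluded by Pre_
  | some a0 => if val < a0 then -1 else findLastGoB val arr 0

-- ===== PRECONDITION & SPEC =====
-- A evaluates arr[0] first, so it raises IndexError exactly on the empty list; Pre_ excludes arr = [].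
def Pre_findLastLittle (arr : List Int) (val : Int) : Prop := arr ≠ []
instance (arr : List Int) (val : Int) : Decidable (Pre_findLastLittle arr val) := by
  unfold Pre_findLastLittle; infer_instance

def pvWitness_findLastLittle : List Int × Int := ([1, 3, 5], 4)

def Spec_findLastLittle (arr : List Int) (val : Int) (out : Int) : Prop := out = findLastLittle_alt arr val
instance (arr : List Int) (val : Int) (out : Int) : Decidable (Spec_findLastLittle arr val out) := by unfold Spec_findLastLittle; infer_instance

-- ===== CLAIM (what is proved, stated in full; the proofs are below) =====
def Claim_equal_findLastLittle : Prop := ∀ (arr : List Int) (val : Int), Dom_findLastLittle arr val → Pre_findLastLittle arr val → Spec_findLastLittle arr val (findLastLittle arr val)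

-- ===== LEMMAS AND PROOFS =====

-- core invariant: B's go on the slice arr[li : hi+1] with offset li computes A's loop on (li, hi)
lemma goB_eq_loopA (arr : List Int) (val : Int) :
    ∀ (k : Nat) (li hi : Int), 0 ≤ li → li + k = hi + 1 → hi < (arr.length : Int) →
      findLastGoB val ((arr.drop li.toNat).take k) li = findLastLoopA arr val li hi := by
  intro k
  induction k using Nat.strong_induction_on with
  | _ k IH =>
    intro li hi h0 hk hlen
    rcases Nat.eq_zero_or_pos k with hk0 | hkpos
    · subst hk0
      rw [findLastGoB, findLastLoopA]
      rw [dif_pos (List.take_zero), dif_neg (show ¬ li ≤ hi by omega)]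
      omega
    · -- the slice is nonempty and its length is exactly k
      set sub := (arr.drop li.toNat).take k with hsub
      have hsublen : sub.length = k := by
        simp only [hsub, List.length_take, List.length_drop]; omega
      have hmid := PySem.Int.floordiv_two_mid_bounds (show li ≤ hi by omega)
      have hmb := PySem.Int.floordiv_two_mid_bounds
        (show (0:Int) ≤ (sub.length : Int) - 1 by rw [hsublen]; omega)
      -- relate the two midpoints: mid = li + m
      have hfd : PySem.Int.floordiv (li + hi) 2 =
          li + PySem.Int.floordiv ((sub.length : Int) - 1) 2 := by
        rw [PySem.Int.floordiv_eq_ediv_of_pos (by omega),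
            PySem.Int.floordiv_eq_ediv_of_pos (by omega), hsublen]
        omega
      set m := PySem.Int.floordiv ((sub.length : Int) - 1) 2 with hm
      have hm0 : 0 ≤ m := by omega
      have hmk : m ≤ (k : Int) - 1 := by rw [hsublen] at hmb; omega
      -- the probed elements coincide
      have hget : PySem.List.pyGet? sub m = PySem.List.pyGet? arr (li + m) := by
        rw [PySem.List.pyGet?_of_nonneg_of_lt sub hm0 (by omega),
            PySem.List.pyGet?_of_nonneg_of_lt arr (by omega) (by omega)]
        simp only [hsub]
        rw [List.getElem?_take, List.getElem?_drop]
        have : li.toNat + m.toNat = (li + m).toNat := by omega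
        simp [this, (by omega : m.toNat < k)]
      rw [findLastGoB, findLastLoopA]
      rw [dif_pos (show li ≤ hi by omega)]
      simp only [← hm, hfd]
      rw [dif_neg (show ¬ sub = [] from fun he => by simp [he] at hsublen; omega)]
      rw [hget]
      cases hx : PySem.List.pyGet? arr (li + m) with
      | none => rfl
      | some x =>
        by_cases h1 : x < val
        · simp only [if_pos h1]
          -- right half: sub[m+1:] = arr[li+m+1 : hi+1]
          rw [PySem.List.slice_from sub (by omega)]
          have hdrop : sub.drop (m + 1).toNat =
              (arr.drop (li + m + 1).toNat).take (k - (m + 1).toNat) := by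
            simp only [hsub, List.drop_take, List.drop_drop]
            congr 2
            omega
          rw [hdrop]
          have := IH (k - (m + 1).toNat) (by omega) (li + m + 1) hi (by omega) (by omega) hlen
          rw [show li + m + 1 = li + (m + 1) by ring] at this ⊢
          exact this
        · simp only [if_neg h1]
          by_cases h2 : x > val
          · simp only [if_pos h2]
            -- left half: sub[:m] = arr[li : li+m]
            rw [PySem.List.slice_to sub (by omega)]
            have htake : sub.take m.toNat = (arr.drop li.toNat).take m.toNat := by
              simp only [hsub, List.take_take]
              congr 1
              omega
            rw [htake]
            exact IH m.toNat (by omega) li (li + m - 1) h0 (by omega) (by omega)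
          · simp only [if_neg h2]

-- ===== VERDICT (by name: the statement is the Claim_ definition above) =====
theorem findLastLittle_spec : Claim_equal_findLastLittle := by
  intro arr val _ hpre
  unfold Spec_findLastLittle findLastLittle findLastLittle_alt
  have hne : arr ≠ [] := hpre
  have hlen : 0 < arr.length := List.length_pos_iff.mpr hne
  rw [PySem.List.pyGet?_eq_some_getElem arr (by omega) (by exact_mod_cast hlen)]
  dsimp only
  split_ifs with hv
  · rfl
  · have := goB_eq_loopA arr val arr.length 0 ((arr.length : Int) - 1)
      (by omega) (by omega) (by omega)
    simp only [Int.toNat_zero, List.drop_zero, List.take_length] at this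
    exact this.symm
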